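-- pv_equiv track=rewrite | github.com/MoamenAhmedEl-Nashar/simple-connect4-AI-game | connect4.py | connected_items_in_list
-- ===== SOURCE A (Python) =====
-- def connected_items_in_list(items_list, item_color):
--     """
--     this is a helper function that used in utility function.
--     it counts the maximum number of connected items of specific color in a list.
--     inputs :
--     items_list : list of the game items : None, "RED", or "YEL"
--     item_color : "RED", "YEL" to count
--     outputs:
--     max_connected_num : the maximum number of connected items of specific color in a list
--     """
--     max_connected_num = 0
--     connected_num = 0
--     for item in items_list:
--         if item == item_color:
--             connected_num += 1
--             max_connected_num = connected_num if connected_num > max_connected_num else max_connected_num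
--         else:
--             connected_num = 0
--     return max_connected_num
-- ===== SOURCE B (Python) =====
-- def connected_items_in_list(items_list, item_color):
--     # group-then-reduce: split the list into maximal runs of equal consecutive
--     # items, then take the max length among runs of the requested color.
--     if not items_list:
--         return 0
--     runs = []
--     cur, n = items_list[0], 1
--     for y in items_list[1:]:
--         if y == cur:
--             n += 1
--         else:
--             runs.append((cur, n))
--             cur, n = y, 1
--     runs.append((cur, n))
--     return max((m for k, m in runs if k == item_color), default=0)
-- ===== Notes on version B (the rewrite author's own statement) =====
-- stated objective: alternative
-- what changed: B splits the list into maximal runs of equal consecutive items and then takes the max length among runs of the requested color, instead of A's reset-on-mismatch running counter with an inline running maximum.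
import Mathlib
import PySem

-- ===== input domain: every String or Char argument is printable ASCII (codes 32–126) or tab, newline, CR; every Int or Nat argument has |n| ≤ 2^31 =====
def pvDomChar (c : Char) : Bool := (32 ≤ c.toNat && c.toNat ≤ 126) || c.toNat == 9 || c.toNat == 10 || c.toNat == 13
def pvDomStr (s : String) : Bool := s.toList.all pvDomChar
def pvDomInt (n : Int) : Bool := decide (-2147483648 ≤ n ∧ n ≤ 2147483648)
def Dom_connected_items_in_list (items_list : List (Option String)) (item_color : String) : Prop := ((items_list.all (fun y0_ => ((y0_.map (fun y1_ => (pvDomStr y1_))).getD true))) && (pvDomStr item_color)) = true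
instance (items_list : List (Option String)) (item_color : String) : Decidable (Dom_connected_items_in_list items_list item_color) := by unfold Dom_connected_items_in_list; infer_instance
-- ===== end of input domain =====

-- B builds the list of maximal runs of equal consecutive items and takes the max length
-- among runs of the requested color, instead of A's reset-on-mismatch running counter (alternative decomposition).


-- ===== PORT A =====
-- literal port of A: fold over the items with state (max_connected_num, connected_num)
def connected_items_in_list (items_list : List (Option String)) (item_color : String) : Int :=
  (items_list.foldl
    (fun (s : Int × Int) item =>
      if item == some item_color then
        (if s.2 + 1 > s.1 then s.2 + 1 else s.1, s.2 + 1)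
      else (s.1, 0))
    (0, 0)).1

-- ===== PORT B =====
-- B's run grouping: carry the current run (cur, n) and emit it when the item changes
-- (structural recursion form of Source B's loop over items_list[1:])
def pvRunsAux (x : Option String) (n : Int) : List (Option String) → List (Option String × Int)
  | [] => [(x, n)]
  | y :: ys => if y == x then pvRunsAux x (n + 1) ys else (x, n) :: pvRunsAux y 1 ys

-- max((m for k, m in runs if k == item_color), default=0)
def connected_items_in_list_alt (items_list : List (Option String)) (item_color : String) : Int :=
  match items_list with
  | [] => 0
  | x :: xs =>
    (pvRunsAux x 1 xs).foldl
      (fun acc p => if p.1 == some item_color then max acc p.2 else acc) 0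

-- ===== PRECONDITION & SPEC =====
def Spec_connected_items_in_list (items_list : List (Option String)) (item_color : String) (out : Int) : Prop := out = connected_items_in_list_alt items_list item_color
instance (items_list : List (Option String)) (item_color : String) (out : Int) : Decidable (Spec_connected_items_in_list items_list item_color out) := by unfold Spec_connected_items_in_list; infer_instance

-- ===== CLAIM (what is proved, stated in full; the proofs are below) =====
def Claim_equal_connected_items_in_list : Prop := ∀ (items_list : List (Option String)) (item_color : String), Dom_connected_items_in_list items_list item_color → Spec_connected_items_in_list items_list item_color (connected_items_in_list items_list item_color)

-- ===== LEMMAS AND PROOFS =====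

-- max run length of `c` in `l` assuming a current run of length `k` directly precedes `l`
def pvRR (c : String) (k : Int) : List (Option String) → Int
  | [] => 0
  | x :: xs => if x == some c then max (k + 1) (pvRR c (k + 1) xs) else pvRR c 0 xs

lemma pvRR_nonneg (c : String) : ∀ (l : List (Option String)) (k : Int), 0 ≤ pvRR c k l := by
  intro l
  induction l with
  | nil => intro k; simp [pvRR]
  | cons x xs ih =>
    intro k
    simp only [pvRR]
    split
    · exact le_trans (ih (k + 1)) (le_max_right _ _)
    · exact ih 0

lemma foldA_eq (c : String) : ∀ (l : List (Option String)) (m k : Int), 0 ≤ m →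
    (l.foldl
      (fun (s : Int × Int) item =>
        if item == some c then
          (if s.2 + 1 > s.1 then s.2 + 1 else s.1, s.2 + 1)
        else (s.1, 0)) (m, k)).1 = max m (pvRR c k l) := by
  intro l
  induction l with
  | nil => intro m k hm; simp [pvRR, max_eq_left hm]
  | cons x xs ih =>
    intro m k hm
    simp only [List.foldl_cons, pvRR]
    by_cases hx : x == some c
    · simp only [hx, if_pos]
      have h1 : (if k + 1 > m then k + 1 else m) = max m (k + 1) := by
        split <;> omega
      rw [h1, ih _ _ (le_trans hm (le_max_left _ _)), max_assoc]
    · simp only [hx, Bool.false_eq_true, if_false]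
      rw [ih _ _ hm]

lemma foldB_eq (c : String) : ∀ (xs : List (Option String)) (x : Option String) (n acc : Int),
    0 ≤ acc → 0 ≤ n →
    (pvRunsAux x n xs).foldl
      (fun acc p => if p.1 == some c then max acc p.2 else acc) acc
      = max acc (if x == some c then max n (pvRR c n xs) else pvRR c 0 xs) := by
  intro xs
  induction xs with
  | nil =>
    intro x n acc hacc hn
    by_cases hx : x == some c
    · simp only [pvRunsAux, List.foldl_cons, List.foldl_nil, pvRR, hx, if_pos]
      omega
    · simp only [pvRunsAux, List.foldl_cons, List.foldl_nil, pvRR, hx,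
        Bool.false_eq_true, if_false]
      omega
  | cons y ys ih =>
    intro x n acc hacc hn
    simp only [pvRunsAux]
    by_cases hyx : y == x
    · simp only [hyx, if_pos]
      rw [ih x (n + 1) acc hacc (by omega)]
      have hyx' : y = x := by simpa using hyx
      subst hyx'
      by_cases hx : y == some c
      · simp only [pvRR, hx, if_pos]
        omega
      · simp [pvRR, hx]
    · simp only [hyx, Bool.false_eq_true, if_false, List.foldl_cons]
      by_cases hx : x == some c
      · simp only [hx, if_pos]
        rw [ih y 1 (max acc n) (le_trans hacc (le_max_left _ _)) (by omega)]
        have hyc : ¬ (y == some c) = true := by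
          intro h
          exact hyx (by rw [(by simpa using h : y = some c), (by simpa using hx : x = some c)]; simp)
        simp only [pvRR, hyc, Bool.false_eq_true, if_false]
        rw [max_assoc]
      · simp only [hx, Bool.false_eq_true, if_false]
        rw [ih y 1 acc hacc (by omega)]
        by_cases hyc : y == some c
        · simp [pvRR, hyc]
        · simp [pvRR, hyc]

-- ===== VERDICT (by name: the statement is the Claim_ definition above) =====
theorem connected_items_in_list_spec : Claim_equal_connected_items_in_list := by
  intro l c _
  show connected_items_in_list l c = connected_items_in_list_alt l c
  cases l with
  | nil => simp [connected_items_in_list, connected_items_in_list_alt]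
  | cons x xs =>
    have hB : connected_items_in_list_alt (x :: xs) c
        = (pvRunsAux x 1 xs).foldl
            (fun acc p => if p.1 == some c then max acc p.2 else acc) 0 := rfl
    unfold connected_items_in_list
    rw [hB, foldA_eq c _ 0 0 le_rfl, foldB_eq c xs x 1 0 le_rfl (by omega)]
    have h0 : 0 ≤ pvRR c 0 (x :: xs) := pvRR_nonneg c (x :: xs) 0
    simp only [pvRR, zero_add] at h0 ⊢
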